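-- pv_equiv track=rewrite | github.com/shauryasf/Advent-of-code | AOC 2025/day3.py | jolts
-- ===== SOURCE A (Python) =====
-- def jolts(rows, k):
--     res = 0
--     for row in rows:
--         vals = list(map(int, row))
--         n = len(row)
--         stack = 0
--         l = 0
--         for i in range(n):
--             while l and stack % 10 < vals[i] and n - i >= k + 1 - l:
--                 stack //= 10
--                 l -= 1
--             if l < k:
--                 stack = 10 * stack + vals[i]
--                 l += 1
--         res += stack
--     return res
-- ===== SOURCE B (Python) =====
-- def _pick(ds, t):
--     # greedily choose the largest length-t digit subsequence of ds (1 <= t <= len(ds))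
--     if t == 0:
--         return []
--     window = ds[:len(ds) - t + 1]
--     m = max(window)
--     i = window.index(m)
--     return [m] + _pick(ds[i + 1:], t - 1)
--
-- def jolts(rows, k):
--     res = 0
--     for row in rows:
--         ds = [int(c) for c in row]
--         t = min(k, len(ds))
--         num = 0
--         for d in (_pick(ds, t) if t > 0 else []):
--             num = 10 * num + d
--         res += num
--     return res
-- ===== Notes on version B (the rewrite author's own statement) =====
-- stated objective: alternative
-- what changed: Replaces the monotonic-stack scan encoding the answer in a base-10 accumulator by direct greedy selection: each output digit is chosen as the leftmost maximum of a shrinking window that still leaves enough digits, recursing on the suffix after it.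
import Mathlib
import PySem

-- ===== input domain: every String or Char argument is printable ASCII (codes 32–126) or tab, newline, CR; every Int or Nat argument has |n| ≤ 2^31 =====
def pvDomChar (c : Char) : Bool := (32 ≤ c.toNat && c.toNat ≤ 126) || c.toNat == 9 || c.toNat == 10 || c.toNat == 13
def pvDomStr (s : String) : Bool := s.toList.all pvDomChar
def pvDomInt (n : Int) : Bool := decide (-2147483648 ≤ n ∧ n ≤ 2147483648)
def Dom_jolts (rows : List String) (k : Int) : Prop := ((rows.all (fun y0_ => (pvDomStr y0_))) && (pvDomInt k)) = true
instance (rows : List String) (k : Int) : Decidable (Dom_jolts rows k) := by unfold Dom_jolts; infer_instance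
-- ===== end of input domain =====

-- B replaces A's monotonic-stack scan by greedy leftmost-maximum window selection (alternative
-- algorithm, similar cost); equivalence is proved for rows of decimal digits (Pre_).

-- ===== PORT A =====
-- int(c) for a single character: exact for '0'..'9' (all rows admitted by Pre_jolts);
-- Python raises ValueError on other characters, which Pre_jolts excludes.
def valOf (c : Char) : Int := (c.toNat : Int) - 48

-- the inner `while l and stack % 10 < vals[i] and n - i >= k + 1 - l` loop; l is the stack
-- depth, in Python always ≥ 0, ported as Nat (so `while l` = `l ≠ 0` is the successor pattern)
def popA (v n k i : Int) : Int → Nat → Int × Nat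
  | stack, 0 => (stack, 0)
  | stack, l + 1 =>
    if PySem.Int.mod stack 10 < v ∧ n - i ≥ k + 1 - ((l : Int) + 1) then
      popA v n k i (PySem.Int.floordiv stack 10) l
    else (stack, l + 1)

-- the `for i in range(n)` loop over vals, carrying the index i and state (stack, l)
def loopA (n k : Int) : List Int → Int → Int → Nat → Int
  | [], _, stack, _ => stack
  | v :: vs, i, stack, l =>
    let p := popA v n k i stack l
    if (p.2 : Int) < k then loopA n k vs (i + 1) (10 * p.1 + v) (p.2 + 1)
    else loopA n k vs (i + 1) p.1 p.2

def jolts (rows : List String) (k : Int) : Int :=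
  rows.foldl
    (fun res row => res + loopA (PySem.Str.len row) k (row.toList.map valOf) 0 0 0) 0

-- ===== PORT B =====
-- _pick(ds, t): greedily choose the largest length-t digit subsequence (Source B);
-- on every call 1 ≤ t ≤ len(ds), so the window is nonempty and m occurs in it (the getD
-- defaults are never used on B's call pattern)
def pickB (ds : List Int) : Nat → List Int
  | 0 => []
  | t + 1 =>
    let w := PySem.List.slice ds none (some ((ds.length : Int) - ((t : Int) + 1) + 1))
    let m := (PySem.List.max? w (fun x => x)).getD 0
    let i := ((PySem.List.index? w m).getD 0 : Nat)
    m :: pickB (PySem.List.slice ds (some ((i : Int) + 1)) none) t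

def jolts_alt (rows : List String) (k : Int) : Int :=
  rows.foldl
    (fun res row =>
      let ds := row.toList.map valOf
      let t := min k (ds.length : Int)
      res + (if t > 0 then pickB ds t.toNat else []).foldl (fun num d => 10 * num + d) 0) 0

-- ===== PRECONDITION & SPEC =====
-- Pre_ excludes rows containing any non-digit character: there Python's int(c) raises
-- ValueError in A (and in B alike).
def Pre_jolts (rows : List String) (k : Int) : Prop :=
  (rows.all fun row => row.toList.all Char.isDigit) = true
instance (rows : List String) (k : Int) : Decidable (Pre_jolts rows k) := by
  unfold Pre_jolts; infer_instance
def pvWitness_jolts : List String × Int := (["321", "19"], 2)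

def Spec_jolts (rows : List String) (k : Int) (out : Int) : Prop := out = jolts_alt rows k
instance (rows : List String) (k : Int) (out : Int) : Decidable (Spec_jolts rows k out) := by
  unfold Spec_jolts; infer_instance

-- ===== CLAIM (what is proved, stated in full; the proofs are below) =====
def Claim_equal_jolts : Prop := ∀ (rows : List String) (k : Int),
  Dom_jolts rows k → Pre_jolts rows k → Spec_jolts rows k (jolts rows k)

-- ===== LEMMAS AND PROOFS =====

-- digit lists: every entry in [0, 10)
def Digits (l : List Int) : Prop := ∀ d ∈ l, 0 ≤ d ∧ d < 10

-- the base-10 accumulator value of a digit list (most significant first)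
def numOf (σ : List Int) : Int := σ.foldl (fun a d => 10 * a + d) 0

-- abstract versions of A's loops on an explicit stack (head = top of stack)
def popAbs (v k r : Int) : List Int → List Int
  | [] => []
  | d :: st => if d < v ∧ r ≥ k + 1 - ((st.length : Int) + 1) then popAbs v k r st else d :: st

def loopAbs (k : Int) : List Int → List Int → List Int
  | [], st => st
  | v :: vs, st =>
    let st' := popAbs v k ((vs.length : Int) + 1) st
    if (st'.length : Int) < k then loopAbs k vs (v :: st') else loopAbs k vs st'

theorem numOf_append (σ : List Int) (d : Int) : numOf (σ ++ [d]) = 10 * numOf σ + d := by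
  simp [numOf]

theorem mod10 (a d : Int) (h0 : 0 ≤ d) (h1 : d < 10) : PySem.Int.mod (10 * a + d) 10 = d := by
  simp [pysem]; omega

theorem div10 (a d : Int) (h0 : 0 ≤ d) (h1 : d < 10) :
    PySem.Int.floordiv (10 * a + d) 10 = a := by
  rw [PySem.Int.floordiv_eq_iff_of_pos (by norm_num)]
  constructor <;> nlinarith

theorem popAbs_subset (v k r : Int) (st : List Int) : ∀ x ∈ popAbs v k r st, x ∈ st := by
  induction st with
  | nil => simp [popAbs]
  | cons d t ih =>
    intro x hx
    by_cases h : d < v ∧ r ≥ k + 1 - ((t.length : Int) + 1)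
    · simp only [popAbs, if_pos h] at hx; exact List.mem_cons_of_mem _ (ih x hx)
    · simp only [popAbs, if_neg h] at hx; exact hx

theorem popA_eq (v n k i : Int) (st : List Int) (hd : Digits st) :
    popA v n k i (numOf st.reverse) st.length =
      (numOf (popAbs v k (n - i) st).reverse, (popAbs v k (n - i) st).length) := by
  induction st with
  | nil => simp [popA, popAbs, numOf]
  | cons d t ih =>
    obtain ⟨hd0, hd1⟩ := hd d List.mem_cons_self
    have hdt : Digits t := fun x hx => hd x (List.mem_cons_of_mem _ hx)
    have hrev : numOf ((d :: t).reverse) = 10 * numOf t.reverse + d := by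
      simp [numOf_append]
    show popA v n k i (numOf ((d :: t).reverse)) (t.length + 1) = _
    rw [hrev]
    simp only [popA, mod10 _ _ hd0 hd1, div10 _ _ hd0 hd1]
    by_cases h : d < v ∧ n - i ≥ k + 1 - ((t.length : Int) + 1)
    · rw [if_pos h, ih hdt]
      simp only [popAbs]
      rw [if_pos h]
    · rw [if_neg h]
      simp only [popAbs, if_neg h]
      simp [numOf_append]

theorem loopA_eq (n k : Int) (vs : List Int) (i : Int) (st : List Int)
    (hvs : Digits vs) (hst : Digits st) (hn : i + vs.length = n) :
    loopA n k vs i (numOf st.reverse) st.length = numOf (loopAbs k vs st).reverse := by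
  induction vs generalizing i st with
  | nil => simp [loopA, loopAbs]
  | cons v vs ih =>
    have hv := hvs v List.mem_cons_self
    have hvs' : Digits vs := fun x hx => hvs x (List.mem_cons_of_mem _ hx)
    have hni : n - i = (vs.length : Int) + 1 := by
      simp only [List.length_cons] at hn; push_cast at hn ⊢; omega
    have hn' : (i + 1) + (vs.length : Int) = n := by omega
    have hsub : Digits (popAbs v k ((vs.length : Int) + 1) st) := fun x hx =>
      hst x (popAbs_subset _ _ _ _ x hx)
    simp only [loopA, loopAbs]
    rw [popA_eq v n k i st hst, hni]
    dsimp only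
    by_cases hpush : ((popAbs v k ((vs.length : Int) + 1) st).length : Int) < k
    · rw [if_pos hpush, if_pos hpush]
      have hnum : numOf ((v :: popAbs v k ((vs.length : Int) + 1) st).reverse) =
          10 * numOf (popAbs v k ((vs.length : Int) + 1) st).reverse + v := by
        simp [numOf_append]
      have hrec := ih (i + 1) (v :: popAbs v k ((vs.length : Int) + 1) st) hvs'
        (fun x hx => by
          rcases List.mem_cons.mp hx with h | h
          · exact h ▸ hv
          · exact hsub x h) hn'
      rw [← hnum]
      exact hrec
    · rw [if_neg hpush, if_neg hpush]
      exact ih (i + 1) _ hvs' hsub hn'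

-- pop-all: everything on the stack is smaller than v and the remaining-room test passes
theorem popAbs_all (v k r : Int) (st : List Int) (hst : ∀ x ∈ st, x < v) (hr : r ≥ k) :
    popAbs v k r st = [] := by
  induction st with
  | nil => rfl
  | cons d t ih =>
    have h1 : d < v := hst d List.mem_cons_self
    have h2 : r ≥ k + 1 - ((t.length : Int) + 1) := by
      have : (0:Int) ≤ (t.length : Int) := by positivity
      omega
    rw [popAbs, if_pos ⟨h1, h2⟩]
    exact ih (fun x hx => hst x (List.mem_cons_of_mem _ hx))

-- the bottom element m is never popped when the side condition fails
theorem popAbs_lift (v k r m : Int) (σ : List Int) (h : ¬(m < v ∧ r ≥ k)) :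
    popAbs v k r (σ ++ [m]) = popAbs v (k - 1) r σ ++ [m] := by
  induction σ with
  | nil =>
    simp only [List.nil_append, popAbs]
    rw [if_neg]
    intro ⟨h1, h2⟩
    exact h ⟨h1, by simpa using h2⟩
  | cons d σ ih =>
    simp only [List.cons_append, popAbs, List.length_append, List.length_cons]
    have hcond : (d < v ∧ r ≥ k + 1 - (((σ.length + 1 : Nat) : Int) + 1)) ↔
        (d < v ∧ r ≥ k - 1 + 1 - ((σ.length : Int) + 1)) := by
      constructor <;> (intro ⟨a, b⟩; exact ⟨a, by push_cast at b ⊢; omega⟩)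
    by_cases hc : d < v ∧ r ≥ k - 1 + 1 - ((σ.length : Int) + 1)
    · rw [if_pos (by exact_mod_cast hcond.mpr hc), if_pos hc, ih]
    · rw [if_neg (fun hx => hc (hcond.mp (by exact_mod_cast hx))), if_neg hc]
      rfl

-- processing a prefix of elements < m followed by m itself leaves exactly [m] on the stack
theorem loopAbs_prefix (k m : Int) (hk : 1 ≤ k) (rest : List Int)
    (hr : (rest.length : Int) + 1 ≥ k) :
    ∀ (p st : List Int), (∀ x ∈ p, x < m) → (∀ x ∈ st, x < m) →
      loopAbs k (p ++ m :: rest) st = loopAbs k rest [m] := by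
  intro p
  induction p with
  | nil =>
    intro st _ hst
    simp only [List.nil_append, loopAbs]
    rw [popAbs_all m k _ st hst hr, if_pos (by simp; try omega)]
  | cons v p ih =>
    intro st hp hst
    simp only [List.cons_append, loopAbs]
    have hst'lt : ∀ x ∈ popAbs v k (((p ++ m :: rest).length : Int) + 1) st, x < m :=
      fun x hx => hst x (popAbs_subset _ _ _ _ x hx)
    have hv : v < m := hp v List.mem_cons_self
    by_cases hpush : ((popAbs v k (((p ++ m :: rest).length : Int) + 1) st).length : Int) < k
    · rw [if_pos hpush]
      exact ih _ (fun x hx => hp x (List.mem_cons_of_mem _ hx))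
        (fun x hx => by
          rcases List.mem_cons.mp hx with h | h
          · exact h ▸ hv
          · exact hst'lt x h)
    · rw [if_neg hpush]
      exact ih _ (fun x hx => hp x (List.mem_cons_of_mem _ hx)) hst'lt

-- with 0 < k a first element is pushed onto the empty stack without pops
theorem loopAbs_cons_nil (k m : Int) (rest : List Int) (hk : 0 < k) :
    loopAbs k (m :: rest) [] = loopAbs k rest [m] := by
  simp only [loopAbs, popAbs]
  rw [if_pos (by simp; try omega)]

-- lifting: with m pinned at the bottom, the machine behaves like the (k-1)-machine above it
theorem loopAbs_lift (k m : Int) : ∀ (vs σ : List Int),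
    (∀ xs ys v, vs = xs ++ v :: ys → m < v → ((ys.length : Int) + 1) < k) →
    loopAbs k vs (σ ++ [m]) = loopAbs (k - 1) vs σ ++ [m] := by
  intro vs
  induction vs with
  | nil => intro σ _; rfl
  | cons v vs ih =>
    intro σ H
    have hbot : ¬ (m < v ∧ ((vs.length : Int) + 1) ≥ k) := by
      intro h; have := H [] vs v rfl h.1; omega
    simp only [loopAbs]
    rw [popAbs_lift v k ((vs.length : Int) + 1) m σ hbot]
    have H' : ∀ xs ys v', vs = xs ++ v' :: ys → m < v' → ((ys.length : Int) + 1) < k :=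
      fun xs ys v' hxy h' => H (v :: xs) ys v' (by rw [hxy]; rfl) h'
    have hlen : (((popAbs v (k - 1) ((vs.length : Int) + 1) σ ++ [m]).length : Int)) =
        ((popAbs v (k - 1) ((vs.length : Int) + 1) σ).length : Int) + 1 := by
      simp
    by_cases hc : ((popAbs v (k - 1) ((vs.length : Int) + 1) σ).length : Int) < k - 1
    · rw [if_pos (by rw [hlen]; omega), if_pos hc, ← List.cons_append, ih _ H']
    · rw [if_neg (by rw [hlen]; omega), if_neg hc]
      exact ih _ H'

theorem loopAbs_nonpos (k : Int) (hk : k ≤ 0) (vs : List Int) : loopAbs k vs [] = [] := by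
  induction vs with
  | nil => rfl
  | cons v vs ih =>
    simp only [loopAbs, popAbs]
    rw [if_neg (by simp; try omega)]
    exact ih

-- main: A's stack machine computes B's greedy selection (reversed: head = top of stack)
theorem main_eq : ∀ (N : Nat) (ds : List Int) (k : Int), ds.length ≤ N → Digits ds →
    loopAbs k ds [] = (pickB ds (min k (ds.length : Int)).toNat).reverse := by
  intro N
  induction N with
  | zero =>
    intro ds k hlen _
    have hnil : ds = [] := List.eq_nil_of_length_eq_zero (Nat.le_zero.mp hlen)
    subst hnil
    rw [show (min k ((([]:List Int).length : Int))).toNat = 0 from by simp; try omega]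
    rfl
  | succ N ih =>
    intro ds k hlen hd
    by_cases hk : k ≤ 0
    · rw [loopAbs_nonpos k hk,
        show (min k ((ds.length : Int))).toNat = 0 from by omega]
      rfl
    push_neg at hk
    by_cases hnil : ds = []
    · subst hnil
      rw [show (min k ((([]:List Int).length : Int))).toNat = 0 from by simp; try omega]
      rfl
    set n := ds.length with hn
    have hn1 : 1 ≤ n := List.length_pos_iff.mpr hnil
    set t : Int := min k (n : Int) with ht
    set T := t.toNat with hT
    have hTt : (T : Int) = t := by omega
    have hT1 : 1 ≤ T := by omega
    have hTn : T ≤ n := by omega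
    obtain ⟨T', hT'⟩ : ∃ T', T = T' + 1 := ⟨T - 1, by omega⟩
    have hwslice : PySem.List.slice ds none (some ((ds.length : Int) - ((T' : Int) + 1) + 1)) =
        ds.take (n - T + 1) := by
      rw [show (ds.length : Int) - ((T' : Int) + 1) + 1 = ((n - T + 1 : Nat) : Int) from by
        push_cast; omega]
      exact PySem.List.slice_to_natCast _ _
    set w := ds.take (n - T + 1) with hw
    have hwlen : w.length = n - T + 1 := by
      rw [hw, List.length_take]; omega
    have hwne : w ≠ [] := by
      intro hcon; rw [hcon] at hwlen; simp at hwlen; try omega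
    obtain ⟨m, hm⟩ : ∃ m, PySem.List.max? w (fun x => x) = some m := by
      rcases hmm : PySem.List.max? w (fun x => x) with _ | m
      · exact absurd ((PySem.List.max?_eq_none_iff _ _).mp hmm) hwne
      · exact ⟨m, rfl⟩
    have hm_max : ∀ y ∈ w, y ≤ m := fun y hy => PySem.List.max?_isMax hm y hy
    obtain ⟨i, hi⟩ : ∃ i, PySem.List.index? w m = some i := by
      rcases hii : PySem.List.index? w m with _ | i
      · exact absurd ((PySem.List.index?_eq_none_iff _ _).mp hii) (by simpa using PySem.List.max?_mem hm)
      · exact ⟨i, rfl⟩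
    obtain ⟨pre, suf, hwdecomp, hprelen, hmpre⟩ := (PySem.List.index?_eq_some_iff _ _ _).mp hi
    have hpre_lt : ∀ x ∈ pre, x < m := by
      intro x hx
      have hle : x ≤ m := hm_max x (by rw [hwdecomp]; exact List.mem_append_left _ hx)
      have hne : x ≠ m := fun he => hmpre (he ▸ hx)
      omega
    have hi_lt : i < n - T + 1 := by
      have : pre.length < w.length := by rw [hwdecomp]; simp
      omega
    set rest := suf ++ ds.drop (n - T + 1) with hrest
    have hds : ds = pre ++ m :: rest := by
      conv_lhs => rw [← List.take_append_drop (n - T + 1) ds]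
      rw [← hw, hwdecomp, hrest]; simp
    have hrestlen : n = i + 1 + rest.length := by
      have hcl := congrArg List.length hds
      simp [hprelen] at hcl
      omega
    have hd_rest : Digits rest := by
      intro x hx
      exact hd x (by rw [hds]; exact List.mem_append_right _ (List.mem_cons_of_mem _ hx))
    have stepA : loopAbs k ds [] = loopAbs k rest [m] := by
      by_cases hkn : k ≤ (n : Int)
      · rw [hds]
        exact loopAbs_prefix k m (by omega) rest (by omega) pre [] hpre_lt (by simp)
      · have hpre0 : pre = [] := List.eq_nil_of_length_eq_zero (by omega)
        rw [hds, hpre0, List.nil_append]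
        exact loopAbs_cons_nil k m rest (by omega)
    have stepB : loopAbs k rest [m] = loopAbs (k - 1) rest [] ++ [m] := by
      have H : ∀ xs ys v, rest = xs ++ v :: ys → m < v → ((ys.length : Int) + 1) < k := by
        intro xs ys v hxy hmv
        by_contra hcon
        push_neg at hcon
        have hlen2 : n = i + 1 + xs.length + 1 + ys.length := by
          rw [hxy] at hrestlen; simp at hrestlen; omega
        have hds2 : ds = (pre ++ m :: xs) ++ v :: ys := by rw [hds, hxy]; simp
        have hlen1 : (pre ++ m :: xs).length = i + 1 + xs.length := by
          simp [hprelen]; omega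
        have hj : (pre ++ m :: xs).length < n - T + 1 := by rw [hlen1]; omega
        have hv_mem : v ∈ w := by
          rw [hw, hds2, List.take_append]
          refine List.mem_append_right _ ?_
          obtain ⟨c', hc'⟩ : ∃ c', n - T + 1 - (pre ++ m :: xs).length = c' + 1 :=
            ⟨n - T - (pre ++ m :: xs).length, by omega⟩
          rw [hc', List.take_succ_cons]
          exact List.mem_cons_self
        have := hm_max v hv_mem
        omega
      simpa using loopAbs_lift k m rest [] H
    have hrest_le : rest.length ≤ N := by omega
    have ihrest := ih rest (k - 1) hrest_le hd_rest
    rw [show (min (k - 1) ((rest.length : Int))).toNat = T' from by omega] at ihrest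
    have hpick : pickB ds T = m :: pickB rest T' := by
      rw [hT']
      show pickB ds (T' + 1) = _
      simp only [pickB]
      rw [hwslice, hm]
      simp only [Option.getD_some]
      rw [hi]
      simp only [Option.getD_some]
      rw [show ((i : Int) + 1) = (((i + 1 : Nat)) : Int) from by push_cast; ring,
        PySem.List.slice_from_natCast]
      rw [hds, show pre ++ m :: rest = (pre ++ [m]) ++ rest from by simp,
        show i + 1 = (pre ++ [m]).length from by simp [hprelen], List.drop_left]
    calc loopAbs k ds [] = loopAbs (k - 1) rest [] ++ [m] := by rw [stepA, stepB]
      _ = (pickB rest T').reverse ++ [m] := by rw [ihrest]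
      _ = (m :: pickB rest T').reverse := by simp
      _ = (pickB ds T).reverse := by rw [hpick]

theorem row_eq (k : Int) (row : String) (h : ∀ c ∈ row.toList, c.isDigit = true) :
    loopA (PySem.Str.len row) k (row.toList.map valOf) 0 0 0 =
      (if min k (((row.toList.map valOf).length : Int)) > 0
       then pickB (row.toList.map valOf) (min k (((row.toList.map valOf).length : Int))).toNat
       else []).foldl (fun num d => 10 * num + d) 0 := by
  have hdig : Digits (row.toList.map valOf) := by
    intro x hx
    simp only [List.mem_map] at hx
    obtain ⟨c, hc, rfl⟩ := hx
    have hcd := h c hc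
    have h48 : 48 ≤ (c.toNat : Int) ∧ (c.toNat : Int) ≤ 57 := by
      simp [Char.isDigit] at hcd
      obtain ⟨h1, h2⟩ := hcd
      have g1 : (48:UInt32).toNat ≤ c.val.toNat := UInt32.le_iff_toNat_le.mp h1
      have g2 : c.val.toNat ≤ (57:UInt32).toNat := UInt32.le_iff_toNat_le.mp h2
      have hv : c.toNat = c.val.toNat := rfl
      simp at g1 g2
      omega
    simp [valOf]; omega
  have hlenA : PySem.Str.len row = (((row.toList.map valOf).length : Int)) := by
    simp [PySem.Str.len_eq]
  rw [hlenA]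
  have h0 : loopA (((row.toList.map valOf).length : Int)) k (row.toList.map valOf) 0 0 0 =
      numOf (loopAbs k (row.toList.map valOf) []).reverse :=
    loopA_eq _ k _ 0 [] hdig (by intro x hx; simp at hx) (by simp)
  rw [h0, main_eq (row.toList.map valOf).length _ k le_rfl hdig, List.reverse_reverse]
  by_cases ht : min k (((row.toList.map valOf).length : Int)) > 0
  · rw [if_pos ht]; rfl
  · rw [if_neg ht,
      show (min k (((row.toList.map valOf).length : Int))).toNat = 0 from by omega]
    rfl

-- ===== VERDICT (by name: the statement is the Claim_ definition above) =====
theorem jolts_spec : Claim_equal_jolts := by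
  intro rows k _ hpre
  have hpre' : ∀ row ∈ rows, ∀ c ∈ row.toList, c.isDigit = true := fun row hrow c hc =>
    List.all_eq_true.mp (List.all_eq_true.mp hpre row hrow) c hc
  unfold Spec_jolts jolts jolts_alt
  apply PySem.List.foldl_congr_mem'
  intro row hrow acc
  exact congrArg (fun z => acc + z) (row_eq k row (hpre' row hrow))
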